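-- pv_equiv track=rewrite | github.com/rancidplanet/yahtzee | play_yahtzee.py | __c_three_of_a_kind
-- ===== SOURCE A (Python) =====
-- def unique_helper(hand):
--
--     #count the unique values
--     unique_list = [[x,0] for x in range(1,6+1)]
--
--     for die in hand:
--         for val in unique_list:
--                 if die == val[0]:
--                     val[1] = val[1] + 1
--
--     unique_list.sort(key = lambda x:x[1], reverse=True)
--
--     return unique_list
--
-- def __c_three_of_a_kind(hand):
--     #return values that are more than three
--     unique_list = unique_helper(hand)
--     ret = []
--     for thing in unique_list:
--         if thing[1] >= 3:
--             ret.append((thing[0],thing[1]))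
--     if len(ret) == 0:
--         return None
--     else:
--         return ret
-- ===== SOURCE B (Python) =====
-- def __c_three_of_a_kind(hand):
--     # Count each face 1..6 once, then emit (face, count) buckets by count
--     # descending (face ascending within a bucket) instead of sorting a table.
--     counts = [(v, hand.count(v)) for v in range(1, 7)]
--     ret = [p for c in range(len(hand), 2, -1) for p in counts if p[1] == c]
--     return ret or None
-- ===== Notes on version B (the rewrite author's own statement) =====
-- stated objective: alternative
-- what changed: B counts each face 1..6 once with list.count and emits (face,count) pairs by enumerating counts from len(hand) down to 3 (bucket selection), instead of A's nested counting loop over a mutable table followed by a stable reverse sort and a filter.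
import Mathlib
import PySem

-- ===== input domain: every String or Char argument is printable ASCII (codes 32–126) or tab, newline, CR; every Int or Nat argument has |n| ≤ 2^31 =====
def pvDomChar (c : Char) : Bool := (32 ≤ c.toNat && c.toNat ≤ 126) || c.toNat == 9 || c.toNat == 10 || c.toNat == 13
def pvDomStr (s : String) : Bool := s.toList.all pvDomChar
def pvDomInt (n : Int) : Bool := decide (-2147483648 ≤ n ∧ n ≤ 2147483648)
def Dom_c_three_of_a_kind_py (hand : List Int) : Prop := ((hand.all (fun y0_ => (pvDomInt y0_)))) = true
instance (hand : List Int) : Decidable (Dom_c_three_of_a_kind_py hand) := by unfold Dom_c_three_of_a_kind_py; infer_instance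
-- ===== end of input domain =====

-- B replaces A's mutable count table + stable reverse sort by one counting pass and
-- descending-count bucket selection; equivalence of the return values is proved below.

-- ===== PORT A =====
def c_three_of_a_kind_py (hand : List Int) : Option (List (Int × Int)) :=
  -- unique_helper: build [[x,0] for x in range(1,6+1)], count, sort by count descending (stable)
  let uniqueList0 : List (Int × Int) := (PySem.List.pyRange 1 (6+1) 1).map (fun x => (x, (0:Int)))
  let uniqueList1 := hand.foldl
    (fun ul die => ul.map (fun val => if die = val.1 then (val.1, val.2 + 1) else val)) uniqueList0
  let uniqueList := PySem.List.sorted uniqueList1 (fun x => x.2) true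
  -- __c_three_of_a_kind body
  let ret := uniqueList.foldl
    (fun acc thing => if 3 ≤ thing.2 then acc ++ [(thing.1, thing.2)] else acc) ([] : List (Int × Int))
  if ret.length = 0 then none else some ret

-- ===== PORT B =====
def c_three_of_a_kind_py_alt (hand : List Int) : Option (List (Int × Int)) :=
  let counts : List (Int × Int) := (PySem.List.pyRange 1 7 1).map (fun v => (v, (PySem.List.count hand v : Int)))
  let ret := ((PySem.List.pyRange (hand.length : Int) 2 (-1)).map
    (fun c => counts.filter (fun p => p.2 == c))).flatten
  if ret = [] then none else some ret

-- ===== PRECONDITION & SPEC =====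
def Spec_c_three_of_a_kind_py (hand : List Int) (out : Option (List (Int × Int))) : Prop := out = c_three_of_a_kind_py_alt hand
instance (hand : List Int) (out : Option (List (Int × Int))) : Decidable (Spec_c_three_of_a_kind_py hand out) := by unfold Spec_c_three_of_a_kind_py; infer_instance

-- ===== CLAIM (what is proved, stated in full; the proofs are below) =====
def Claim_equal_c_three_of_a_kind_py : Prop := ∀ (hand : List Int), Dom_c_three_of_a_kind_py hand → Spec_c_three_of_a_kind_py hand (c_three_of_a_kind_py hand)

-- ===== LEMMAS AND PROOFS =====

-- strict "count descending, then face ascending" order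
def Lrel (a b : Int × Int) : Prop := b.2 < a.2 ∨ (a.2 = b.2 ∧ a.1 < b.1)

theorem Lrel_antisymm {a b : Int × Int} (h1 : Lrel a b) (h2 : Lrel b a) : a = b := by
  rcases h1 with h1 | ⟨h1, h1'⟩ <;> rcases h2 with h2 | ⟨h2, h2'⟩ <;> omega

-- A's counting loop: each table entry picks up the count of its face
theorem countFold_eq (hand : List Int) (s : List (Int × Int)) :
    hand.foldl (fun ul die => ul.map (fun val => if die = val.1 then (val.1, val.2 + 1) else val)) s
      = s.map (fun p => (p.1, p.2 + (hand.count p.1 : Int))) := by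
  induction hand generalizing s with
  | nil => simp
  | cons d t ih =>
    simp only [List.foldl_cons, ih, List.map_map]
    refine List.map_congr_left (fun p _ => ?_)
    by_cases h : d = p.1
    · simp [h]
      omega
    · simp [h]

def tableOf (hand : List Int) : List (Int × Int) :=
  (PySem.List.pyRange 1 7 1).map (fun v => (v, (PySem.List.count hand v : Int)))

theorem table_eq (hand : List Int) :
    hand.foldl (fun ul die => ul.map (fun val => if die = val.1 then (val.1, val.2 + 1) else val))
      ((PySem.List.pyRange 1 (6+1) 1).map (fun x => (x, (0:Int))))
      = tableOf hand := by
  rw [countFold_eq]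
  simp [tableOf, List.map_map, PySem.List.count_eq]

theorem tableOf_faces (hand : List Int) : (tableOf hand).Pairwise (fun a b => a.1 < b.1) := by
  unfold tableOf
  rw [List.pairwise_map]
  exact (PySem.List.pairwise_lt_pyRange_one 1 7).imp (fun h => h)

theorem tableOf_snd_le (hand : List Int) :
    ∀ p ∈ tableOf hand, 0 ≤ p.2 ∧ p.2 ≤ (hand.length : Int) := by
  intro p hp
  unfold tableOf at hp
  rw [List.mem_map] at hp
  obtain ⟨v, _, rfl⟩ := hp
  simp [PySem.List.count_eq]
  exact_mod_cast List.count_le_length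

-- insertBy keeps Lrel-sortedness when the new element's face is above every face present
theorem insertBy_pairwise_Lrel (x : Int × Int) (acc : List (Int × Int))
    (hp : acc.Pairwise Lrel) (hf : ∀ a ∈ acc, a.1 < x.1) :
    (PySem.List.insertBy (fun a b => decide (b.2 < a.2)) x acc).Pairwise Lrel := by
  induction acc with
  | nil => simp [PySem.List.insertBy]
  | cons y ys ih =>
    rw [List.pairwise_cons] at hp
    by_cases h : y.2 < x.2
    · simp only [PySem.List.insertBy, h, decide_true, if_true]
      refine List.pairwise_cons.2 ⟨?_, List.pairwise_cons.2 ⟨hp.1, hp.2⟩⟩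
      intro z hz
      rcases List.mem_cons.1 hz with rfl | hz'
      · exact Or.inl h
      · have := hp.1 z hz'
        unfold Lrel at this ⊢
        omega
    · simp only [PySem.List.insertBy, h, decide_false]
      refine List.pairwise_cons.2 ⟨?_, ih hp.2 (fun a ha => hf a (List.mem_cons_of_mem _ ha))⟩
      intro z hz
      rcases (PySem.List.mem_insertBy _ _ _ _).1 hz with rfl | hz'
      · have hface := hf y (List.mem_cons_self)
        unfold Lrel
        omega
      · exact hp.1 z hz'

theorem foldl_insertBy_pairwise_Lrel (xs : List (Int × Int)) (acc : List (Int × Int))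
    (hp : acc.Pairwise Lrel) (hcross : ∀ a ∈ acc, ∀ x ∈ xs, a.1 < x.1)
    (hx : xs.Pairwise (fun a b => a.1 < b.1)) :
    (xs.foldl (fun acc x => PySem.List.insertBy (fun a b => decide (b.2 < a.2)) x acc) acc).Pairwise Lrel := by
  induction xs generalizing acc with
  | nil => exact hp
  | cons x t ih =>
    rw [List.pairwise_cons] at hx
    refine ih _ (insertBy_pairwise_Lrel x acc hp (fun a ha => hcross a ha x List.mem_cons_self)) ?_ hx.2
    intro a ha z hz
    rcases (PySem.List.mem_insertBy _ _ _ _).1 ha with rfl | ha'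
    · exact hx.1 z hz
    · exact hcross a ha' z (List.mem_cons_of_mem _ hz)

theorem sorted_rev_pairwise_Lrel (xs : List (Int × Int))
    (hx : xs.Pairwise (fun a b => a.1 < b.1)) :
    (PySem.List.sorted xs (fun p => p.2) true).Pairwise Lrel := by
  rw [PySem.List.sorted_rev_eq_foldl_insertBy]
  exact foldl_insertBy_pairwise_Lrel xs [] (by simp) (by simp) hx

-- A's append-if loop is a filter
theorem foldl_ret_eq_filter (l : List (Int × Int)) (acc : List (Int × Int)) :
    l.foldl (fun acc thing => if 3 ≤ thing.2 then acc ++ [(thing.1, thing.2)] else acc) acc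
      = acc ++ l.filter (fun p => decide (3 ≤ p.2)) := by
  induction l generalizing acc with
  | nil => simp
  | cons x t ih =>
    by_cases h : 3 ≤ x.2
    · simp [h, ih]
    · simp [h, ih]

-- disjoint filters concatenate to a filter of the disjunction, up to permutation
theorem filter_or_perm {α : Type} (p q : α → Bool) (h : ∀ x, ¬(p x = true ∧ q x = true)) (xs : List α) :
    (xs.filter p ++ xs.filter q).Perm (xs.filter (fun x => p x || q x)) := by
  induction xs with
  | nil => simp
  | cons x t ih =>
    by_cases hp : p x = true
    · have hq : q x = false := by
        rcases Bool.eq_false_or_eq_true (q x) with h' | h'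
        · exact absurd ⟨hp, h'⟩ (h x)
        · exact h'
      simpa [hp, hq] using ih.cons x
    · rw [Bool.not_eq_true] at hp
      by_cases hq : q x = true
      · simp only [List.filter_cons, hp, hq, Bool.false_or, if_true]
        exact List.perm_middle.trans (ih.cons x)
      · rw [Bool.not_eq_true] at hq
        simpa [hp, hq] using ih

-- bucketing a list by the distinct key values of cs permutes its filter by membership in cs
theorem flatten_buckets_perm (xs : List (Int × Int)) (cs : List Int) (hnd : cs.Nodup) :
    ((cs.map (fun c => xs.filter (fun p => p.2 == c))).flatten).Perm
      (xs.filter (fun p => decide (p.2 ∈ cs))) := by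
  induction cs with
  | nil => simp
  | cons c t ih =>
    rw [List.nodup_cons] at hnd
    simp only [List.map_cons, List.flatten_cons]
    refine ((List.Perm.append_left _ (ih hnd.2)).trans ?_)
    refine (filter_or_perm _ _ ?_ xs).trans ?_
    · intro x ⟨h1, h2⟩
      rw [beq_iff_eq] at h1
      rw [decide_eq_true_eq] at h2
      exact hnd.1 (h1 ▸ h2)
    · refine List.Perm.of_eq (List.filter_congr ?_)
      intro x _
      by_cases h' : x.2 = c
      · simp [List.mem_cons, h']
      · simp [List.mem_cons, h']

-- ===== VERDICT (by name: the statement is the Claim_ definition above) =====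
theorem c_three_of_a_kind_py_spec : Claim_equal_c_three_of_a_kind_py := by
  intro hand _
  unfold Spec_c_three_of_a_kind_py c_three_of_a_kind_py c_three_of_a_kind_py_alt
  simp only [table_eq]
  set F := tableOf hand with hF
  set cs := PySem.List.pyRange (hand.length : Int) 2 (-1) with hcs
  -- the two intermediate lists
  rw [foldl_ret_eq_filter]
  simp only [List.nil_append]
  set retA := (PySem.List.sorted F (fun x => x.2) true).filter (fun p => decide (3 ≤ p.2)) with hra
  set retB := ((cs.map (fun c => F.filter (fun p => p.2 == c))).flatten) with hrb
  have hnd : cs.Nodup := by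
    rw [hcs, PySem.List.pyRange_neg_one_eq_reverse]
    exact List.nodup_reverse.2 (PySem.List.nodup_pyRange_one _ _)
  -- retA = retB
  have hperm : retA.Perm retB := by
    have h1 : retA.Perm (F.filter (fun p => decide (3 ≤ p.2))) :=
      (PySem.List.sorted_perm F (fun x => x.2) true).filter _
    have h2 : retB.Perm (F.filter (fun p => decide (3 ≤ p.2))) := by
      refine (flatten_buckets_perm F cs hnd).trans (List.Perm.of_eq (List.filter_congr ?_))
      intro p hp
      have hb := tableOf_snd_le hand p hp
      have : p.2 ∈ cs ↔ 3 ≤ p.2 := by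
        rw [hcs, PySem.List.mem_pyRange_neg_one]
        omega
      simp [this]
    exact h1.trans h2.symm
  have hpa : retA.Pairwise Lrel := by
    rw [hra]
    exact (sorted_rev_pairwise_Lrel F (tableOf_faces hand)).filter _
  have hpb : retB.Pairwise Lrel := by
    rw [hrb, List.pairwise_flatten]
    constructor
    · intro l hl
      rw [List.mem_map] at hl
      obtain ⟨c, _, rfl⟩ := hl
      have hfaces : (F.filter (fun p => p.2 == c)).Pairwise (fun a b => a.1 < b.1) :=
        (tableOf_faces hand).filter _
      refine hfaces.imp_of_mem ?_
      intro a b ha hb hab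
      have ha2 : a.2 = c := by simpa using (List.of_mem_filter ha)
      have hb2 : b.2 = c := by simpa using (List.of_mem_filter hb)
      exact Or.inr ⟨ha2.trans hb2.symm, hab⟩
    · rw [List.pairwise_map]
      have hcs_gt : cs.Pairwise (fun a b => b < a) := by
        rw [hcs, PySem.List.pyRange_neg_one_eq_reverse, List.pairwise_reverse]
        exact PySem.List.pairwise_lt_pyRange_one _ _
      refine hcs_gt.imp_of_mem ?_
      intro c1 c2 _ _ hlt x hx y hy
      have hx2 : x.2 = c1 := by simpa using (List.of_mem_filter hx)
      have hy2 : y.2 = c2 := by simpa using (List.of_mem_filter hy)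
      exact Or.inl (by omega)
  have heq : retA = retB :=
    hperm.eq_of_pairwise (le := Lrel) (fun a b _ _ h1 h2 => Lrel_antisymm h1 h2) hpa hpb
  rw [heq]
  simp only [List.length_eq_zero_iff]
  rfl
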